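-- pv_equiv track=rewrite | github.com/Lim-YongKwan/codetree-TILs | 240228/함수를 이용한 합과 소수 판별/use-functions-to-determine-sums-and-decimals.py | find_decimal
-- ===== SOURCE A (Python) =====
-- def find_decimal(a, b):
--     answer = 0
--     for i in range(a, b+1):
--         for j in range(2, i+1):
--             if i % j == 0:
--                 if j == i and find_even_number(i):
--                     answer += 1
--                 else:
--                     break
--     return answer
--
-- def find_even_number(n):
--     num = 0
--     while n > 0:
--         num += n % 10
--         n = n//10
--     if num % 2 == 0:
--         return True
--     return False
-- ===== SOURCE B (Python) =====
-- def find_decimal(a, b):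
--     def digit_sum_even(n):
--         s = 0
--         while n > 0:
--             s += n % 10
--             n //= 10
--         return s % 2 == 0
--
--     def is_prime(n):
--         if n < 2:
--             return False
--         d = 2
--         while d * d <= n:
--             if n % d == 0:
--                 return False
--             d += 1
--         return True
--
--     count = 0
--     n = a if a > 2 else 2
--     while n <= b:
--         if is_prime(n) and digit_sum_even(n):
--             count += 1
--         n += 1
--     return count
-- ===== Notes on version B (the rewrite author's own statement) =====
-- stated objective: alternative
-- what changed: Replace A's trial division by every j up to i with trial division only up to sqrt(n), scanning from max(a,2) with a while loop instead of range(a,b+1).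
import Mathlib
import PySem

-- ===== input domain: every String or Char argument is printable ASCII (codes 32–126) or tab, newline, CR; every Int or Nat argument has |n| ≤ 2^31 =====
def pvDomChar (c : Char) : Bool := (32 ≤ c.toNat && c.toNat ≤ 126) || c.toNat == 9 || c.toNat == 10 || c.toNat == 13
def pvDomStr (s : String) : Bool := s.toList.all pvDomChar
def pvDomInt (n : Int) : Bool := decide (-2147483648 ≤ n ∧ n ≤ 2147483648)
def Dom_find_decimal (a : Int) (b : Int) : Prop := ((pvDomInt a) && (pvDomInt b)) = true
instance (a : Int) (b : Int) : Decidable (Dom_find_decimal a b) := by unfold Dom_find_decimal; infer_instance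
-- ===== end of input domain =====

-- B tests divisors only up to sqrt(n) and scans from max(a,2), instead of A's trial division by every j up to i; same count of primes in [a,b] with even digit sum.

-- ===== PORT A =====

-- while n > 0: num += n % 10; n = n // 10   (the body of find_even_number; the same loop appears verbatim in B's digit_sum_even)
def digitSumLoop (n : Int) (num : Int) : Int :=
  if 0 < n then digitSumLoop (PySem.Int.floordiv n 10) (num + PySem.Int.mod n 10) else num
termination_by n.toNat
decreasing_by
  simp only [PySem.Int.floordiv_eq_ediv_of_pos (by omega : (0:Int) < 10)]
  omega

def find_even_number (n : Int) : Bool :=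
  if PySem.Int.mod (digitSumLoop n 0) 2 = 0 then true else false

-- for j in range(2, i+1): if i % j == 0: (count if j == i and digit sum even, else break)
def find_decimal_inner (i : Int) : List Int → Int
  | [] => 0
  | j :: rest =>
      if PySem.Int.mod i j = 0 then
        (if j = i ∧ find_even_number i then 1 else 0)
      else find_decimal_inner i rest

def find_decimal (a : Int) (b : Int) : Int :=
  (PySem.List.pyRange a (b + 1) 1).foldl
    (fun answer i => answer + find_decimal_inner i (PySem.List.pyRange 2 (i + 1) 1)) 0

-- ===== PORT B =====

-- B's digit_sum_even: the same digit loop, then s % 2 == 0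
def digit_sum_even (n : Int) : Bool :=
  decide (PySem.Int.mod (digitSumLoop n 0) 2 = 0)

-- while d * d <= n: if n % d == 0: return False; d += 1
def is_prime_loop (n : Int) (d : Int) : Bool :=
  if h : d * d ≤ n then
    (if PySem.Int.mod n d = 0 then false else is_prime_loop n (d + 1))
  else true
termination_by (n + 1 - d).toNat
decreasing_by
  have hdn : d ≤ n := by nlinarith [sq_nonneg d, sq_nonneg (d - 1)]
  omega

def is_prime (n : Int) : Bool := if n < 2 then false else is_prime_loop n 2

-- while n <= b: count if prime and even digit sum; n += 1
def alt_loop (b : Int) (n : Int) (count : Int) : Int :=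
  if h : n ≤ b then
    alt_loop b (n + 1) (if is_prime n && digit_sum_even n then count + 1 else count)
  else count
termination_by (b + 1 - n).toNat

def find_decimal_alt (a : Int) (b : Int) : Int :=
  alt_loop b (if a > 2 then a else 2) 0

-- ===== PRECONDITION & SPEC =====
def Spec_find_decimal (a : Int) (b : Int) (out : Int) : Prop := out = find_decimal_alt a b
instance (a : Int) (b : Int) (out : Int) : Decidable (Spec_find_decimal a b out) := by unfold Spec_find_decimal; infer_instance

-- ===== CLAIM (what is proved, stated in full; the proofs are below) =====
def Claim_equal_find_decimal : Prop := ∀ (a : Int) (b : Int), Dom_find_decimal a b → Spec_find_decimal a b (find_decimal a b)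

-- ===== LEMMAS AND PROOFS =====

-- "i has no proper divisor in [2, i)": what both primality loops decide
def NoDivProp (i : Int) : Prop := ∀ k : Int, 2 ≤ k → k < i → ¬ (k ∣ i)

-- the per-element contribution both programs add
def primeEvenOne (i : Int) : Int := if is_prime i && digit_sum_even i then 1 else 0

lemma find_even_eq (i : Int) : find_even_number i = digit_sum_even i := by
  simp [find_even_number, digit_sum_even]

-- A's inner loop from j upward (no divisor below j) decides NoDivProp
lemma inner_char (i : Int) (hi : 2 ≤ i) :
    ∀ (m : Nat) (j : Int), (i + 1 - j).toNat = m → 2 ≤ j → j ≤ i →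
      (∀ k, 2 ≤ k → k < j → ¬ (k ∣ i)) →
      ((NoDivProp i →
          find_decimal_inner i (PySem.List.pyRange j (i + 1) 1)
            = if find_even_number i then 1 else 0) ∧
       (¬ NoDivProp i →
          find_decimal_inner i (PySem.List.pyRange j (i + 1) 1) = 0)) := by
  intro m
  induction m with
  | zero => intro j hm h2j hji hnd; omega
  | succ m ih =>
      intro j hm h2j hji hnd
      rw [PySem.List.pyRange_one_cons (by omega : j < i + 1)]
      by_cases hmod : PySem.Int.mod i j = 0
      · have hdvd : j ∣ i := (PySem.Int.mod_eq_zero_iff_dvd i j).mp hmod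
        by_cases hjei : j = i
        · constructor
          · intro _
            subst hjei
            simp [find_decimal_inner, hmod]
          · intro hnP
            exact absurd (fun k h2k hki => hnd k h2k (by omega)) hnP
        · have hjlt : j < i := lt_of_le_of_ne hji hjei
          constructor
          · intro hP; exact absurd hdvd (hP j h2j hjlt)
          · intro _
            simp [find_decimal_inner, hmod, hjei]
      · have hjne : j ≠ i := by
          intro he
          exact hmod (by rw [he]; exact (PySem.Int.mod_eq_zero_iff_dvd i i).mpr dvd_rfl)
        have hrec := ih (j + 1) (by omega) (by omega) (by omega)
          (fun k h2k hkj => by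
            rcases lt_or_eq_of_le (by omega : k ≤ j) with h | h
            · exact hnd k h2k h
            · subst h; exact fun hd => hmod ((PySem.Int.mod_eq_zero_iff_dvd i k).mpr hd))
        simp only [find_decimal_inner, if_neg hmod]
        exact hrec

-- no divisor below d, none at all in [d, sqrt]: then none in [2, n)
lemma nodiv_of_below (n d : Int) (hd : 2 ≤ d) (hdd : n < d * d)
    (hnd : ∀ k, 2 ≤ k → k < d → ¬ (k ∣ n)) : NoDivProp n := by
  intro k h2k hkn hdvd
  obtain ⟨q, hq⟩ := hdvd
  have hk0 : (0:Int) < k := by omega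
  have hq0 : (0:Int) < q := by nlinarith
  have hq2 : 2 ≤ q := by
    rcases (by omega : q = 1 ∨ 2 ≤ q) with h | h
    · exfalso; rw [h, mul_one] at hq; omega
    · exact h
  have hqdvd : q ∣ n := ⟨k, by rw [hq, mul_comm]⟩
  have hqn : q < n := by nlinarith
  have hkd : d ≤ k := le_of_not_gt fun h => hnd k h2k h ⟨q, hq⟩
  have hqd : d ≤ q := le_of_not_gt fun h => hnd q hq2 h hqdvd
  nlinarith

-- B's sqrt loop decides NoDivProp
lemma is_prime_loop_char (n : Int) (hn : 2 ≤ n) :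
    ∀ (m : Nat) (d : Int), (n - d).toNat = m → 2 ≤ d →
      (∀ k, 2 ≤ k → k < d → ¬ (k ∣ n)) →
      (is_prime_loop n d = true ↔ NoDivProp n) := by
  intro m
  induction m with
  | zero =>
      intro d hm h2d hnd
      have hnled : n ≤ d := by omega
      rw [is_prime_loop, dif_neg (by nlinarith : ¬ d * d ≤ n)]
      simp only [true_iff]
      exact fun k h2k hkn => hnd k h2k (by omega)
  | succ m ih =>
      intro d hm h2d hnd
      rw [is_prime_loop]
      by_cases hdd : d * d ≤ n
      · rw [dif_pos hdd]
        have hdn : d < n := by nlinarith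
        by_cases hmod : PySem.Int.mod n d = 0
        · rw [if_pos hmod]
          simp only [Bool.false_eq_true, false_iff]
          intro hP
          exact hP d h2d hdn ((PySem.Int.mod_eq_zero_iff_dvd n d).mp hmod)
        · rw [if_neg hmod]
          exact ih (d + 1) (by omega) (by omega)
            (fun k h2k hkd => by
              rcases lt_or_eq_of_le (by omega : k ≤ d) with h | h
              · exact hnd k h2k h
              · subst h; exact fun hd => hmod ((PySem.Int.mod_eq_zero_iff_dvd n k).mpr hd))
      · rw [dif_neg hdd]
        simp only [true_iff]
        exact nodiv_of_below n d h2d (by omega) hnd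

lemma is_prime_iff (n : Int) (hn : 2 ≤ n) : is_prime n = true ↔ NoDivProp n := by
  rw [is_prime, if_neg (by omega : ¬ n < 2)]
  exact is_prime_loop_char n hn (n - 2).toNat 2 rfl (by omega) (by omega)

lemma inner_eq_primeEvenOne (i : Int) :
    find_decimal_inner i (PySem.List.pyRange 2 (i + 1) 1) = primeEvenOne i := by
  by_cases hi : 2 ≤ i
  · have hchar := inner_char i hi (i - 1).toNat 2 (by omega) (by omega) hi (by omega)
    by_cases hP : NoDivProp i
    · rw [hchar.1 hP, primeEvenOne, (is_prime_iff i hi).mpr hP, find_even_eq]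
      cases digit_sum_even i <;> simp
    · rw [hchar.2 hP, primeEvenOne, show is_prime i = false from
        Bool.eq_false_iff.mpr (fun h => hP ((is_prime_iff i hi).mp h))]
      simp
  · rw [PySem.List.pyRange_one_eq_nil (by omega : i + 1 ≤ 2)]
    rw [find_decimal_inner, primeEvenOne, is_prime, if_pos (by omega : i < 2)]
    simp

lemma alt_loop_eq (b : Int) :
    ∀ (m : Nat) (n c : Int), (b + 1 - n).toNat = m →
      alt_loop b n c = c + ((PySem.List.pyRange n (b + 1) 1).map primeEvenOne).sum := by
  intro m
  induction m with
  | zero =>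
      intro n c hm
      rw [alt_loop, dif_neg (by omega : ¬ n ≤ b),
        PySem.List.pyRange_one_eq_nil (by omega : b + 1 ≤ n)]
      simp
  | succ m ih =>
      intro n c hm
      rw [alt_loop, dif_pos (by omega : n ≤ b),
        ih (n + 1) _ (by omega),
        PySem.List.pyRange_one_cons (by omega : n < b + 1)]
      simp only [List.map_cons, List.sum_cons]
      have : (if is_prime n && digit_sum_even n then c + 1 else c) = c + primeEvenOne n := by
        rw [primeEvenOne]; split_ifs <;> simp
      rw [this]; ring

lemma sum_zero_of_lt_two (l : List Int) (hl : ∀ i ∈ l, i < 2) :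
    (l.map primeEvenOne).sum = 0 := by
  induction l with
  | nil => simp
  | cons x xs ih =>
      have hx : primeEvenOne x = 0 := by
        rw [primeEvenOne, is_prime, if_pos (hl x (by simp))]; simp
      simp only [List.map_cons, List.sum_cons, hx, zero_add]
      exact ih fun i hi => hl i (by simp [hi])

-- ===== VERDICT (by name: the statement is the Claim_ definition above) =====
theorem find_decimal_spec : Claim_equal_find_decimal := by
  intro a b _
  show find_decimal a b = find_decimal_alt a b
  rw [find_decimal, PySem.List.foldl_add _ (fun i => find_decimal_inner i (PySem.List.pyRange 2 (i + 1) 1)) 0]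
  have hmap : (PySem.List.pyRange a (b + 1) 1).map
      (fun i => find_decimal_inner i (PySem.List.pyRange 2 (i + 1) 1))
      = (PySem.List.pyRange a (b + 1) 1).map primeEvenOne :=
    List.map_congr_left fun i _ => inner_eq_primeEvenOne i
  rw [hmap, zero_add, find_decimal_alt]
  by_cases ha : a > 2
  · rw [if_pos ha, alt_loop_eq b (b + 1 - a).toNat a 0 rfl, zero_add]
  · rw [if_neg ha, alt_loop_eq b (b + 1 - 2).toNat 2 0 rfl, zero_add]
    by_cases hb : 2 ≤ b + 1
    · rw [PySem.List.pyRange_one_append a 2 (b + 1) (by omega) hb, List.map_append,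
        List.sum_append,
        sum_zero_of_lt_two _ (fun i hi => (PySem.List.mem_pyRange_one.mp hi).2), zero_add]
    · rw [PySem.List.pyRange_one_eq_nil (by omega : b + 1 ≤ 2),
        sum_zero_of_lt_two _ (fun i hi => by
          have := PySem.List.mem_pyRange_one.mp hi; omega)]
      simp
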